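-- pv_equiv track=rewrite | github.com/esun0087/euler | pe340.py | get_f_0
-- ===== SOURCE A (Python) =====
-- def get_f_0(iter_times):
--     this_f_0 = 14157885672
--     for i in range(iter_times):
--         if i % 10 == 9:
--             this_f_0 += 14193717480
--         else:
--             this_f_0 += 7096858740
--     return this_f_0
-- ===== SOURCE B (Python) =====
-- def get_f_0(iter_times):
--     n = iter_times if iter_times > 0 else 0
--     q = n // 10
--     return 14157885672 + q * 14193717480 + (n - q) * 7096858740
-- ===== Notes on version B (the rewrite author's own statement) =====
-- stated objective: faster
-- what changed: Replaced the per-iteration loop by a closed form: the indices taking the larger constant are exactly every tenth one, so their count is an integer division and the total is two multiplications.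
import Mathlib
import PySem

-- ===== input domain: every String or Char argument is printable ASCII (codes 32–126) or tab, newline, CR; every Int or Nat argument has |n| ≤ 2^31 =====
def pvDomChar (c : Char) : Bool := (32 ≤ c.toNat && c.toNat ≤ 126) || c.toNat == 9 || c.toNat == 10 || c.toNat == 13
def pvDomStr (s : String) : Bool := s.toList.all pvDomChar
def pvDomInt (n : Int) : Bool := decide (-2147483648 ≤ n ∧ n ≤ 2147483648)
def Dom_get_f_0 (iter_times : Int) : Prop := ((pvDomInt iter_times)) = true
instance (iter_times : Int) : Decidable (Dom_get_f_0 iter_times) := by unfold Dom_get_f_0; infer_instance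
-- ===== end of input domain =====

-- B replaces A's per-iteration loop by a closed form: every tenth index gets the larger constant, counted by integer division.

-- ===== PORT A =====
def get_f_0 (iter_times : Int) : Int :=
  (PySem.List.pyRange 0 iter_times 1).foldl
    (fun this_f_0 i =>
      if PySem.Int.mod i 10 = 9 then this_f_0 + 14193717480 else this_f_0 + 7096858740)
    14157885672

-- ===== PORT B =====
def get_f_0_alt (iter_times : Int) : Int :=
  let n : Int := if iter_times > 0 then iter_times else 0
  let q : Int := PySem.Int.floordiv n 10
  14157885672 + q * 14193717480 + (n - q) * 7096858740

-- ===== PRECONDITION & SPEC =====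
def Spec_get_f_0 (iter_times : Int) (out : Int) : Prop := out = get_f_0_alt iter_times
instance (iter_times : Int) (out : Int) : Decidable (Spec_get_f_0 iter_times out) := by unfold Spec_get_f_0; infer_instance

-- ===== CLAIM (what is proved, stated in full; the proofs are below) =====
def Claim_equal_get_f_0 : Prop := ∀ (iter_times : Int), Dom_get_f_0 iter_times → Spec_get_f_0 iter_times (get_f_0 iter_times)

-- ===== LEMMAS AND PROOFS =====

theorem get_f_0_loop_closed (n : Nat) :
    (PySem.List.pyRange 0 (n : Int) 1).foldl
      (fun this_f_0 i =>
        if PySem.Int.mod i 10 = 9 then this_f_0 + 14193717480 else this_f_0 + 7096858740)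
      14157885672
    = 14157885672 + ((n : Int) / 10) * 14193717480 + ((n : Int) - (n : Int) / 10) * 7096858740 := by
  induction n with
  | zero => simp
  | succ m ih =>
    have h : ((m : Int) + 1) = ((m : Int) + 1) := rfl
    have hcast : ((m + 1 : Nat) : Int) = (m : Int) + 1 := by push_cast; ring
    rw [hcast, PySem.List.pyRange_one_succ_right (by positivity), List.foldl_append, ih]
    simp only [List.foldl]
    by_cases hm : PySem.Int.mod (m : Int) 10 = 9
    · rw [if_pos hm]
      have : (m : Int) % 10 = 9 := by
        rw [PySem.Int.mod, Int.fmod_eq_emod_of_nonneg _ (by positivity)] at hm; exact hm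
      omega
    · rw [if_neg hm]
      have : ¬ ((m : Int) % 10 = 9) := by
        rw [PySem.Int.mod, Int.fmod_eq_emod_of_nonneg _ (by positivity)] at hm; exact hm
      omega

-- ===== VERDICT (by name: the statement is the Claim_ definition above) =====
theorem get_f_0_spec : Claim_equal_get_f_0 := by
  intro t _
  unfold Spec_get_f_0 get_f_0 get_f_0_alt
  by_cases ht : t > 0
  · obtain ⟨n, rfl⟩ : ∃ n : Nat, t = (n : Int) := ⟨t.toNat, by omega⟩
    rw [get_f_0_loop_closed n]
    simp only [if_pos ht]
    have : PySem.Int.floordiv (n : Int) 10 = (n : Int) / 10 := by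
      rw [PySem.Int.floordiv, Int.fdiv_eq_ediv_of_nonneg _ (by positivity)]
    rw [this]
  · rw [PySem.List.pyRange_one_eq_nil (by omega)]
    simp only [if_neg ht, List.foldl_nil]
    norm_num [PySem.Int.floordiv]
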